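-- pv_equiv track=rewrite | github.com/Cosmin-Pavel/Chess-Licenta- | ChessEngine.py | evaluate_fen
-- ===== SOURCE A (Python) =====
-- def evaluate_fen(fen):
--     piece_values = {
--         'P': -10, 'N': -30, 'B': -30, 'R': -50, 'Q': -90, 'K': 0,
--         'p': 10, 'n': 30, 'b': 30, 'r': 50, 'q': 90, 'k': 0
--     }
--
--     # Split the FEN string into its components
--     parts = fen.split()
--
--     if len(parts) != 6:
--         return 0  # Invalid FEN format
--
--     board_layout, turn, castling, en_passant, half_moves, full_moves = parts
--
--     board_score = 0
--
--
--     for char in board_layout: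
--         piece_value = piece_values.get(char, 0)
--         board_score += piece_value
--
--
--
--
--     if turn == 'w':
--         board_score += 20
--     else:
--         board_score -= 20
--
--
--     if 'K' in castling:
--         board_score += 10
--     if 'k' in castling:
--         board_score -= 10
--
--     return board_score
-- ===== SOURCE B (Python) =====
-- def evaluate_fen(fen):
--     parts = fen.split()
--     if len(parts) != 6:
--         return 0  # Invalid FEN format
--
--     board_layout, turn, castling = parts[0], parts[1], parts[2]
--
--     score = 20 if turn == 'w' else -20
--     if 'K' in castling:
--         score += 10
--     if 'k' in castling:
--         score -= 10
--
--     for piece, value in (('P', -10), ('N', -30), ('B', -30), ('R', -50), ('Q', -90),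
--                          ('p', 10), ('n', 30), ('b', 30), ('r', 50), ('q', 90)):
--         score += value * board_layout.count(piece)
--     return score
-- ===== Notes on version B (the rewrite author's own statement) =====
-- stated objective: alternative
-- what changed: Replaces A's character-by-character pass over the board with dict lookups per character by a per-piece aggregation: for each of the ten valued piece types, add value * board_layout.count(piece); the zero-valued K/k entries and per-char dict disappear.
import Mathlib
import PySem

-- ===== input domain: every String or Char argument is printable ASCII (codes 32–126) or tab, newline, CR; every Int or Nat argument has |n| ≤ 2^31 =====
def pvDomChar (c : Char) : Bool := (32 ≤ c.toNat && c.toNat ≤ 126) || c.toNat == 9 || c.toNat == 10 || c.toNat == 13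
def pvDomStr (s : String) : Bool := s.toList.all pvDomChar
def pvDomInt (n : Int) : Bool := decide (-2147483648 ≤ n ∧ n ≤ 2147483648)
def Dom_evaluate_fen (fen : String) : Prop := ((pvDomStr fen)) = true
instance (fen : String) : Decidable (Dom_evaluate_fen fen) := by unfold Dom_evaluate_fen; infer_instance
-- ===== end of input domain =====

-- B replaces A's per-character pass over the board (dict lookup per char) by a per-piece
-- aggregation value * board.count(piece) over the ten valued piece types (objective: alternative).

-- ===== PORT A =====
def pvPieceValues : PySem.Dict Char Int :=
  PySem.Dict.ofList [('P', -10), ('N', -30), ('B', -30), ('R', -50), ('Q', -90), ('K', 0),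
                     ('p', 10), ('n', 30), ('b', 30), ('r', 50), ('q', 90), ('k', 0)]

def evaluate_fen (fen : String) : Int :=
  -- parts = fen.split(); if len(parts) != 6: return 0; then unpack (the match does both)
  match PySem.Str.split₀ fen with
  | [board_layout, turn, castling, _en_passant, _half_moves, _full_moves] =>
    let board_score : Int :=
      board_layout.toList.foldl (fun acc ch => acc + pvPieceValues.getD ch 0) 0
    let board_score := if turn == "w" then board_score + 20 else board_score - 20
    let board_score := if PySem.Str.isIn "K" castling then board_score + 10 else board_score
    let board_score := if PySem.Str.isIn "k" castling then board_score - 10 else board_score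
    board_score
  | _ => 0

-- ===== PORT B =====
def pvPieceTable : List (String × Int) :=
  [("P", -10), ("N", -30), ("B", -30), ("R", -50), ("Q", -90),
   ("p", 10), ("n", 30), ("b", 30), ("r", 50), ("q", 90)]

def evaluate_fen_alt (fen : String) : Int :=
  let parts := PySem.Str.split₀ fen
  if parts.length ≠ 6 then 0
  else
    let board_layout := PySem.List.pyGetD parts 0 ""   -- parts[0], in range under the guard
    let turn := PySem.List.pyGetD parts 1 ""
    let castling := PySem.List.pyGetD parts 2 ""
    let score := if turn == "w" then (20 : Int) else -20
    let score := if PySem.Str.isIn "K" castling then score + 10 else score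
    let score := if PySem.Str.isIn "k" castling then score - 10 else score
    pvPieceTable.foldl (fun acc pv => acc + pv.2 * (PySem.Str.count board_layout pv.1 : Int)) score

-- ===== PRECONDITION & SPEC =====
def Spec_evaluate_fen (fen : String) (out : Int) : Prop := out = evaluate_fen_alt fen
instance (fen : String) (out : Int) : Decidable (Spec_evaluate_fen fen out) := by unfold Spec_evaluate_fen; infer_instance

-- ===== CLAIM (what is proved, stated in full; the proofs are below) =====
def Claim_equal_evaluate_fen : Prop := ∀ (fen : String), Dom_evaluate_fen fen → Spec_evaluate_fen fen (evaluate_fen fen)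

-- ===== LEMMAS AND PROOFS =====

-- single-character str.count is List.count
theorem pv_go_singleton (c : Char) : ∀ (cs : List Char) (fuel acc : Nat), cs.length ≤ fuel →
    PySem.Chars.count.go [c] fuel cs acc = acc + cs.count c := by
  intro cs
  induction cs with
  | nil => intro fuel acc h; cases fuel <;> simp [PySem.Chars.count.go]
  | cons hd t ih =>
    intro fuel acc h
    cases fuel with
    | zero => simp at h
    | succ f =>
      simp at h
      by_cases hc : hd = c
      · subst hc
        simp [PySem.Chars.count.go, List.isPrefixOf, ih f (acc+1) h]
        omega
      · simp [PySem.Chars.count.go, List.isPrefixOf, hc, ih f acc h, Ne.symm hc]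

theorem pv_count_singleton (cs : List Char) (c : Char) : PySem.Chars.count cs [c] = cs.count c := by
  simp [PySem.Chars.count]
  simpa using pv_go_singleton c cs cs.length 0 le_rfl

-- A's per-character sum over the board equals the per-piece weighted counts
set_option maxHeartbeats 1000000 in
theorem pv_board_sum (cs : List Char) : ∀ (init : Int),
    cs.foldl (fun acc ch => acc + pvPieceValues.getD ch 0) init
      = init + (-10) * (cs.count 'P' : Int) + (-30) * cs.count 'N' + (-30) * cs.count 'B'
            + (-50) * cs.count 'R' + (-90) * cs.count 'Q'
            + 10 * cs.count 'p' + 30 * cs.count 'n' + 30 * cs.count 'b'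
            + 50 * cs.count 'r' + 90 * cs.count 'q' := by
  have hpv : pvPieceValues = PySem.Dict.mk [('P', -10), ('N', -30), ('B', -30), ('R', -50), ('Q', -90), ('K', 0),
                     ('p', 10), ('n', 30), ('b', 30), ('r', 50), ('q', 90), ('k', 0)] := by rfl
  induction cs with
  | nil => intro init; simp
  | cons hd t ih =>
    intro init
    rw [List.foldl_cons, ih]
    simp only [List.count_cons, hpv, PySem.Dict.getD, PySem.Dict.get?_mk_cons, beq_iff_eq]
    rcases eq_or_ne 'P' hd with h0|h0
    · subst h0; simp; try (push_cast; ring)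
    rcases eq_or_ne 'N' hd with h1|h1
    · subst h1; simp; try (push_cast; ring)
    rcases eq_or_ne 'B' hd with h2|h2
    · subst h2; simp; try (push_cast; ring)
    rcases eq_or_ne 'R' hd with h3|h3
    · subst h3; simp; try (push_cast; ring)
    rcases eq_or_ne 'Q' hd with h4|h4
    · subst h4; simp; try (push_cast; ring)
    rcases eq_or_ne 'K' hd with h5|h5
    · subst h5; simp; try (push_cast; ring)
    rcases eq_or_ne 'p' hd with h6|h6
    · subst h6; simp; try (push_cast; ring)
    rcases eq_or_ne 'n' hd with h7|h7
    · subst h7; simp; try (push_cast; ring)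
    rcases eq_or_ne 'b' hd with h8|h8
    · subst h8; simp; try (push_cast; ring)
    rcases eq_or_ne 'r' hd with h9|h9
    · subst h9; simp; try (push_cast; ring)
    rcases eq_or_ne 'q' hd with h10|h10
    · subst h10; simp; try (push_cast; ring)
    rcases eq_or_ne 'k' hd with h11|h11
    · subst h11; simp; try (push_cast; ring)
    simp [h0, h1, h2, h3, h4, h5, h6, h7, h8, h9, h10, h11, Ne.symm h0, Ne.symm h1, Ne.symm h2, Ne.symm h3, Ne.symm h4, Ne.symm h6, Ne.symm h7, Ne.symm h8, Ne.symm h9, Ne.symm h10, PySem.Dict.get?]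
    try (push_cast; ring)

theorem pv_alt_fold (bl : String) (score : Int) :
    pvPieceTable.foldl (fun acc pv => acc + pv.2 * (PySem.Chars.count bl.toList pv.1.toList : Int)) score
      = score + (-10) * (bl.toList.count 'P' : Int) + (-30) * bl.toList.count 'N'
            + (-30) * bl.toList.count 'B' + (-50) * bl.toList.count 'R' + (-90) * bl.toList.count 'Q'
            + 10 * bl.toList.count 'p' + 30 * bl.toList.count 'n' + 30 * bl.toList.count 'b'
            + 50 * bl.toList.count 'r' + 90 * bl.toList.count 'q' := by
  simp [pvPieceTable, pv_count_singleton]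

-- ===== VERDICT (by name: the statement is the Claim_ definition above) =====
theorem evaluate_fen_spec : Claim_equal_evaluate_fen := by
  intro fen _
  unfold Spec_evaluate_fen evaluate_fen evaluate_fen_alt
  generalize PySem.Str.split₀ fen = parts
  match parts with
  | [] => rfl
  | [_] => rfl
  | [_, _] => rfl
  | [_, _, _] => rfl
  | [_, _, _, _] => rfl
  | [_, _, _, _, _] => rfl
  | [bl, t, c, ep, hm, fm] =>
    simp only [List.length_cons, List.length_nil]
    norm_num [PySem.List.pyGetD, PySem.List.pyGet?, PySem.List.pyIdx?,
      List.getElem_cons_succ, List.getElem_cons_zero, show Int.toNat 2 = 2 from rfl, show Int.toNat 1 = 1 from rfl,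
      show Int.toNat 0 = 0 from rfl]
    rw [pv_board_sum, pv_alt_fold]
    split_ifs <;> ring
  | _ :: _ :: _ :: _ :: _ :: _ :: _ :: rest =>
    simp [List.length_cons]
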